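-- pv_equiv track=rewrite | github.com/Praneet2126/myCommunity | ai-service/services/activity_recommendation_service.py | get_time_slot_priority
-- ===== SOURCE A (Python) =====
-- from typing import List, Optional, Dict
--
-- def get_time_slot_priority(place: Dict) -> tuple:
--     """
--     Categorize activity by time slot and return (priority, earliest_start_minutes, latest_end_minutes)
--     Priority: 0=morning, 1=afternoon, 2=late_afternoon, 3=evening, 4=night
--     """
--     best_time = place.get("best_time", "").lower()
--     category = place.get("category", "").lower()
--     name = place.get("name", "").lower()
--     description = place.get("description", "").lower()
--
--     # Night activities (9 PM - 3 AM) - Priority 4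
--     if any(keyword in category for keyword in ["casino", "nightlife"]) or \
--        any(keyword in name for keyword in ["club", "casino", "party", "tito", "lpk"]) or \
--        "night" in best_time or \
--        ("09:00 pm" in best_time or "10:00 pm" in best_time or "11:00 pm" in best_time):
--         return (4, 21 * 60, 27 * 60)  # 9 PM - 3 AM
--
--     # Morning activities (6 AM - 11 AM) - Priority 0
--     if any(keyword in category for keyword in ["trek", "wildlife", "nature"]) or \
--        "morning" in best_time or \
--        ("06:00 am" in best_time or "07:00 am" in best_time or "08:00 am" in best_time) or \
--        any(keyword in name for keyword in ["trek", "wildlife", "bird", "yoga"]):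
--         return (0, 6 * 60, 11 * 60)  # 6 AM - 11 AM
--
--     # Beach activities (must end before 6 PM) - Priority 2
--     if "beach" in category or "beach" in name or "sunset" in best_time:
--         return (2, 16 * 60, 18 * 60)  # 4 PM - 6 PM (sunset time)
--
--     # Water sports (10 AM - 5 PM) - Priority 1
--     if "water sports" in category or any(keyword in name for keyword in ["scuba", "parasailing", "kayaking", "jet ski", "surfing"]):
--         return (1, 10 * 60, 17 * 60)  # 10 AM - 5 PM
--
--     # Evening activities (6 PM - 9 PM) - Priority 3
--     if "restaurant" in category or "dining" in category or \
--        any(keyword in name.lower() for keyword in ["restaurant", "dining", "cruise", "cultural show"]) or \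
--        ("06:00 pm" in best_time or "07:00 pm" in best_time or "08:00 pm" in best_time):
--         return (3, 18 * 60, 21 * 60)  # 6 PM - 9 PM
--
--     # Default to afternoon (11 AM - 4 PM) - Priority 1
--     # For museums, forts, shopping, churches, etc.
--     return (1, 11 * 60, 16 * 60)  # 11 AM - 4 PM
--
--     return 120
-- ===== SOURCE B (Python) =====
-- # Inverted keyword->rank index per field; collect ALL matching ranks and take the
-- # minimum, instead of A's ordered early-return if/elif chain.
--
-- _SLOTS = [
--     (4, 21 * 60, 27 * 60),  # 0: night
--     (0, 6 * 60, 11 * 60),   # 1: morning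
--     (2, 16 * 60, 18 * 60),  # 2: beach
--     (1, 10 * 60, 17 * 60),  # 3: water sports
--     (3, 18 * 60, 21 * 60),  # 4: evening
--     (1, 11 * 60, 16 * 60),  # 5: default afternoon
-- ]
--
-- _BT = {"night": 0, "09:00 pm": 0, "10:00 pm": 0, "11:00 pm": 0,
--        "morning": 1, "06:00 am": 1, "07:00 am": 1, "08:00 am": 1,
--        "sunset": 2,
--        "06:00 pm": 4, "07:00 pm": 4, "08:00 pm": 4}
--
-- _CAT = {"casino": 0, "nightlife": 0,
--         "trek": 1, "wildlife": 1, "nature": 1,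
--         "beach": 2,
--         "water sports": 3,
--         "restaurant": 4, "dining": 4}
--
-- _NAME = {"club": 0, "casino": 0, "party": 0, "tito": 0, "lpk": 0,
--          "trek": 1, "wildlife": 1, "bird": 1, "yoga": 1,
--          "beach": 2,
--          "scuba": 3, "parasailing": 3, "kayaking": 3, "jet ski": 3, "surfing": 3,
--          "restaurant": 4, "dining": 4, "cruise": 4, "cultural show": 4}
--
--
-- def get_time_slot_priority(place):
--     fields = [(place.get("best_time", "").lower(), _BT),
--               (place.get("category", "").lower(), _CAT),
--               (place.get("name", "").lower(), _NAME)]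
--     hits = [rank for text, table in fields for kw, rank in table.items() if kw in text]
--     return _SLOTS[min(hits, default=5)]
-- ===== Notes on version B (the rewrite author's own statement) =====
-- stated objective: alternative
-- what changed: Replaces A's ordered early-return if/elif keyword chain by an inverted keyword-to-rank index per field: B collects ALL matching ranks exhaustively and returns the slot of the minimum rank (correct because first matching rule in A's order equals the minimum matched rank).
import Mathlib
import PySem

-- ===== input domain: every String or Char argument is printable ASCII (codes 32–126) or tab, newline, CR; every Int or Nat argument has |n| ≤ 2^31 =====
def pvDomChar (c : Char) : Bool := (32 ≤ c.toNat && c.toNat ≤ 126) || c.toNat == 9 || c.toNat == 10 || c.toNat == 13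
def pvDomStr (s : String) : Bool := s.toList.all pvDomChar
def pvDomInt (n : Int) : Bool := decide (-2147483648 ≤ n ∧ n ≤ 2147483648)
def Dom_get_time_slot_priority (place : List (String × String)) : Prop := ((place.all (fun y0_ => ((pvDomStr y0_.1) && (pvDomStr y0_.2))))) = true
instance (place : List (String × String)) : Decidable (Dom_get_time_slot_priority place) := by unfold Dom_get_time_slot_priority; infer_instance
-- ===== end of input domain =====

-- B collects all matching ranks via an inverted keyword index and takes the minimum,
-- instead of A's ordered early-return keyword chain; same value everywhere (alternative decomposition).

-- ===== PORT A =====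
-- Literal transliteration of A's if/elif keyword chain.
def get_time_slot_priority (place : List (String × String)) : Int × Int × Int :=
  let best_time := PySem.Str.lower (PySem.Dict.getD (PySem.Dict.mk place) "best_time" "")
  let category := PySem.Str.lower (PySem.Dict.getD (PySem.Dict.mk place) "category" "")
  let name := PySem.Str.lower (PySem.Dict.getD (PySem.Dict.mk place) "name" "")
  let _description := PySem.Str.lower (PySem.Dict.getD (PySem.Dict.mk place) "description" "")
  if (["casino", "nightlife"].any (fun k => PySem.Str.isIn k category)) ||
     (["club", "casino", "party", "tito", "lpk"].any (fun k => PySem.Str.isIn k name)) ||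
     PySem.Str.isIn "night" best_time ||
     (PySem.Str.isIn "09:00 pm" best_time || PySem.Str.isIn "10:00 pm" best_time ||
      PySem.Str.isIn "11:00 pm" best_time) then
    (4, 21 * 60, 27 * 60)
  else if (["trek", "wildlife", "nature"].any (fun k => PySem.Str.isIn k category)) ||
     PySem.Str.isIn "morning" best_time ||
     (PySem.Str.isIn "06:00 am" best_time || PySem.Str.isIn "07:00 am" best_time ||
      PySem.Str.isIn "08:00 am" best_time) ||
     (["trek", "wildlife", "bird", "yoga"].any (fun k => PySem.Str.isIn k name)) then
    (0, 6 * 60, 11 * 60)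
  else if PySem.Str.isIn "beach" category || PySem.Str.isIn "beach" name ||
      PySem.Str.isIn "sunset" best_time then
    (2, 16 * 60, 18 * 60)
  else if PySem.Str.isIn "water sports" category ||
     (["scuba", "parasailing", "kayaking", "jet ski", "surfing"].any (fun k => PySem.Str.isIn k name)) then
    (1, 10 * 60, 17 * 60)
  else if PySem.Str.isIn "restaurant" category || PySem.Str.isIn "dining" category ||
     (["restaurant", "dining", "cruise", "cultural show"].any
        (fun k => PySem.Str.isIn k (PySem.Str.lower name))) ||
     (PySem.Str.isIn "06:00 pm" best_time || PySem.Str.isIn "07:00 pm" best_time ||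
      PySem.Str.isIn "08:00 pm" best_time) then
    (3, 18 * 60, 21 * 60)
  else
    (1, 11 * 60, 16 * 60)

-- ===== PORT B =====
-- B's inverted indexes: keyword -> rank (0=night,1=morning,2=beach,3=water,4=evening; 5=default).
def pv_slots : List (Int × Int × Int) :=
  [(4, 21 * 60, 27 * 60), (0, 6 * 60, 11 * 60), (2, 16 * 60, 18 * 60),
   (1, 10 * 60, 17 * 60), (3, 18 * 60, 21 * 60), (1, 11 * 60, 16 * 60)]

def pv_bt : List (String × Nat) :=
  [("night", 0), ("09:00 pm", 0), ("10:00 pm", 0), ("11:00 pm", 0),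
   ("morning", 1), ("06:00 am", 1), ("07:00 am", 1), ("08:00 am", 1),
   ("sunset", 2), ("06:00 pm", 4), ("07:00 pm", 4), ("08:00 pm", 4)]

def pv_cat : List (String × Nat) :=
  [("casino", 0), ("nightlife", 0), ("trek", 1), ("wildlife", 1), ("nature", 1),
   ("beach", 2), ("water sports", 3), ("restaurant", 4), ("dining", 4)]

def pv_name : List (String × Nat) :=
  [("club", 0), ("casino", 0), ("party", 0), ("tito", 0), ("lpk", 0),
   ("trek", 1), ("wildlife", 1), ("bird", 1), ("yoga", 1), ("beach", 2),
   ("scuba", 3), ("parasailing", 3), ("kayaking", 3), ("jet ski", 3), ("surfing", 3),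
   ("restaurant", 4), ("dining", 4), ("cruise", 4), ("cultural show", 4)]

def get_time_slot_priority_alt (place : List (String × String)) : Int × Int × Int :=
  let fields : List (String × List (String × Nat)) :=
    [(PySem.Str.lower (PySem.Dict.getD (PySem.Dict.mk place) "best_time" ""), pv_bt),
     (PySem.Str.lower (PySem.Dict.getD (PySem.Dict.mk place) "category" ""), pv_cat),
     (PySem.Str.lower (PySem.Dict.getD (PySem.Dict.mk place) "name" ""), pv_name)]
  let hits : List Nat :=
    fields.flatMap (fun f => (f.2.filter (fun p => PySem.Str.isIn p.1 f.1)).map Prod.snd)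
  pv_slots.getD (hits.foldl min 5) (1, 11 * 60, 16 * 60)

-- ===== PRECONDITION & SPEC =====
def Spec_get_time_slot_priority (place : List (String × String)) (out : Int × Int × Int) : Prop := out = get_time_slot_priority_alt place
instance (place : List (String × String)) (out : Int × Int × Int) : Decidable (Spec_get_time_slot_priority place out) := by unfold Spec_get_time_slot_priority; infer_instance

-- ===== CLAIM (what is proved, stated in full; the proofs are below) =====
def Claim_equal_get_time_slot_priority : Prop := ∀ (place : List (String × String)), Dom_get_time_slot_priority place → Spec_get_time_slot_priority place (get_time_slot_priority place)

-- ===== LEMMAS AND PROOFS =====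

-- lowercasing is idempotent (A lowercases `name` a second time in the evening branch)
theorem pv_lowerChar_idem (c : Char) :
    PySem.Chars.lowerChar (PySem.Chars.lowerChar c) = PySem.Chars.lowerChar c := by
  by_cases h : PySem.Chars.isupper c = true
  · have hc : 'A' ≤ c ∧ c ≤ 'Z' := by simpa [PySem.Chars.isupper] using h
    have hc1 : 65 ≤ c.toNat := hc.1
    have hc2 : c.toNat ≤ 90 := hc.2
    have hd : PySem.Chars.lowerChar c = Char.ofNat (c.toNat + 32) := by
      simp [PySem.Chars.lowerChar, h]
    have hv : (Char.ofNat (c.toNat + 32)).toNat = c.toNat + 32 := by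
      rw [Char.toNat_ofNat, if_pos]; exact Or.inl (by omega)
    have hup : PySem.Chars.isupper (Char.ofNat (c.toNat + 32)) = false := by
      have hz : ¬ (Char.ofNat (c.toNat + 32) ≤ 'Z') := by
        intro hz
        have : (Char.ofNat (c.toNat + 32)).toNat ≤ 90 := hz
        omega
      simp [PySem.Chars.isupper, hz]
    rw [hd]
    simp [PySem.Chars.lowerChar, hup]
  · have hfix : PySem.Chars.lowerChar c = c := by simp [PySem.Chars.lowerChar, h]
    rw [hfix, hfix]

theorem pv_lower_idem (s : String) :
    PySem.Str.lower (PySem.Str.lower s) = PySem.Str.lower s := by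
  simp [PySem.Str.lower, PySem.Chars.lower, List.map_map, Function.comp_def,
    pv_lowerChar_idem]

-- the first-matching-rank chain of a rank list
def pvChain (L : List Nat) : Nat :=
  if L.any (· == 0) then 0
  else if L.any (· == 1) then 1
  else if L.any (· == 2) then 2
  else if L.any (· == 3) then 3
  else if L.any (· == 4) then 4
  else 5

theorem pvChain_cons (a : Nat) (L : List Nat) :
    pvChain (a :: L) = if a ≤ 4 then min a (pvChain L) else pvChain L := by
  unfold pvChain
  simp only [List.any_cons, Bool.or_eq_true, beq_iff_eq]
  by_cases h0 : L.any (· == 0) = true <;>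
  by_cases h1 : L.any (· == 1) = true <;>
  by_cases h2 : L.any (· == 2) = true <;>
  by_cases h3 : L.any (· == 3) = true <;>
  by_cases h4 : L.any (· == 4) = true <;>
    simp only [h0, h1, h2, h3, h4, if_true, or_true, Bool.false_eq_true, or_false] <;>
    split_ifs <;> first | contradiction | omega

theorem pv_foldl_min (L : List Nat) :
    ∀ d, d ≤ 5 → L.foldl min d = min d (pvChain L) := by
  induction L with
  | nil =>
    intro d hd
    simp only [List.foldl_nil, pvChain, List.any_nil, if_false, Bool.false_eq_true]
    omega
  | cons a L ih =>
    intro d hd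
    rw [List.foldl_cons, pvChain_cons, ih (min d a) (by omega)]
    by_cases ha : a ≤ 4
    · rw [if_pos ha]; omega
    · rw [if_neg ha]; omega

theorem pv_any_filter_map {α β : Type} (l : List α) (p : α → Bool) (f : α → β) (q : β → Bool) :
    (((l.filter p).map f).any q) = l.any (fun a => p a && q (f a)) := by
  induction l with
  | nil => rfl
  | cons a l ih =>
    by_cases hp : p a = true <;> simp [hp, ih]

-- ===== VERDICT (by name: the statement is the Claim_ definition above) =====
set_option maxHeartbeats 2000000 in
theorem get_time_slot_priority_spec : Claim_equal_get_time_slot_priority := by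
  intro place _
  unfold Spec_get_time_slot_priority
  simp only [get_time_slot_priority, get_time_slot_priority_alt,
    List.flatMap_cons, List.flatMap_nil, List.append_nil]
  rw [pv_foldl_min _ 5 (by omega)]
  simp only [pvChain, List.any_append, pv_any_filter_map,
    pv_bt, pv_cat, pv_name, List.any_cons, List.any_nil,
    Nat.reduceBEq, beq_self_eq_true, Bool.and_true, Bool.and_false,
    Bool.or_false, Bool.false_or, pv_lower_idem]
  set bt := PySem.Str.lower (PySem.Dict.getD (PySem.Dict.mk place) "best_time" "") with hbt
  set ct := PySem.Str.lower (PySem.Dict.getD (PySem.Dict.mk place) "category" "") with hct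
  set nm := PySem.Str.lower (PySem.Dict.getD (PySem.Dict.mk place) "name" "") with hnm
  simp only [Bool.or_assoc, Bool.or_comm, Bool.or_left_comm]
  split_ifs <;> rfl
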